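-- pv_equiv track=rewrite | github.com/SebastianKlemkosky/CS-5363-901-Spring-2025-Programming-Languages-and-Compilers | pp3-post/helper_functions.py | get_token_range_on_line
-- ===== SOURCE A (Python) =====
-- def get_token_range_on_line(tokens, line_num):
--     """
--     Returns the (start_col, end_col) that spans all tokens on the given line.
--     Useful for underlining entire expressions like loop tests.
--     """
--     start_col = None
--     end_col = None
--
--     for token in tokens:
--         if token[1] == line_num:
--             if start_col is None or token[2] < start_col:
--                 start_col = token[2]
--             if end_col is None or token[3] > end_col:
--                 end_col = token[3]
--
--     return start_col, end_col
-- ===== SOURCE B (Python) =====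
-- def get_token_range_on_line(tokens, line_num):
--     """
--     Returns the (start_col, end_col) that spans all tokens on the given line.
--     Useful for underlining entire expressions like loop tests.
--     """
--     starts = sorted(t[2] for t in tokens if t[1] == line_num)
--     ends = sorted((t[3] for t in tokens if t[1] == line_num), reverse=True)
--     if not starts:
--         return None, None
--     return starts[0], ends[0]
-- ===== Notes on version B (the rewrite author's own statement) =====
-- stated objective: alternative
-- what changed: Replaces A's single-pass scan with two Optional running accumulators by sort-based selection: sort the start columns ascending and the end columns descending and pick the first element of each.
import Mathlib
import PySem

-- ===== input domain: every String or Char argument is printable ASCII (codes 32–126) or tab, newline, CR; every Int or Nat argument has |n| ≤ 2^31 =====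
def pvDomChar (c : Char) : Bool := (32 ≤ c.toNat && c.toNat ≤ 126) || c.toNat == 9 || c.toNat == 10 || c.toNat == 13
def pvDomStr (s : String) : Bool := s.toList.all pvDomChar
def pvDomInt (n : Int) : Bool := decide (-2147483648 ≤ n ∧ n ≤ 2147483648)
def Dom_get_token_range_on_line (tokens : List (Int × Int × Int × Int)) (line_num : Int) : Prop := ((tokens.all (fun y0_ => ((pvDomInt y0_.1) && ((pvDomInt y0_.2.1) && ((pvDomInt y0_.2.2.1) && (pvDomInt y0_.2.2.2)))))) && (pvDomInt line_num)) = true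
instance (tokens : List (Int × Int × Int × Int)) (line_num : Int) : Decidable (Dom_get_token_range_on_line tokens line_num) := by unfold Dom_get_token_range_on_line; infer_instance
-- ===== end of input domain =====

-- B replaces A's single-pass scan with two Option accumulators by sort-based selection:
-- sort the start columns ascending and the end columns descending and take the head of each
-- (objective: alternative algorithm, not faster).


-- ===== PORT A =====
-- one step of A's loop body: update (start_col, end_col) with one token
def pvStepA (line_num : Int) (st : Option Int × Option Int) (token : Int × Int × Int × Int) :
    Option Int × Option Int :=
  if token.2.1 == line_num then
    let start_col :=
      match st.1 with
      | none => some token.2.2.1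
      | some v => if token.2.2.1 < v then some token.2.2.1 else some v
    let end_col :=
      match st.2 with
      | none => some token.2.2.2
      | some v => if v < token.2.2.2 then some token.2.2.2 else some v
    (start_col, end_col)
  else st

def get_token_range_on_line (tokens : List (Int × Int × Int × Int)) (line_num : Int) :
    Option Int × Option Int :=
  tokens.foldl (pvStepA line_num) (none, none)

-- ===== PORT B =====
def get_token_range_on_line_alt (tokens : List (Int × Int × Int × Int)) (line_num : Int) :
    Option Int × Option Int :=
  let starts := PySem.List.sorted
    ((tokens.filter (fun t => t.2.1 == line_num)).map (fun t => t.2.2.1)) (fun x => x) false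
  let ends := PySem.List.sorted
    ((tokens.filter (fun t => t.2.1 == line_num)).map (fun t => t.2.2.2)) (fun x => x) true
  if starts = [] then (none, none) else (starts.head?, ends.head?)

-- ===== PRECONDITION & SPEC =====
def Spec_get_token_range_on_line (tokens : List (Int × Int × Int × Int)) (line_num : Int) (out : Option Int × Option Int) : Prop := out = get_token_range_on_line_alt tokens line_num
instance (tokens : List (Int × Int × Int × Int)) (line_num : Int) (out : Option Int × Option Int) : Decidable (Spec_get_token_range_on_line tokens line_num out) := by unfold Spec_get_token_range_on_line; infer_instance

-- ===== CLAIM (what is proved, stated in full; the proofs are below) =====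
def Claim_equal_get_token_range_on_line : Prop := ∀ (tokens : List (Int × Int × Int × Int)) (line_num : Int), Dom_get_token_range_on_line tokens line_num → Spec_get_token_range_on_line tokens line_num (get_token_range_on_line tokens line_num)

-- ===== LEMMAS AND PROOFS =====

-- the two Option accumulators of A's loop, as standalone step functions
def pvMinStep (a : Option Int) (x : Int) : Option Int :=
  match a with
  | none => some x
  | some v => if x < v then some x else some v

def pvMaxStep (a : Option Int) (x : Int) : Option Int :=
  match a with
  | none => some x
  | some v => if v < x then some x else some v

lemma pvStepA_split (line_num : Int) (st : Option Int × Option Int)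
    (token : Int × Int × Int × Int) :
    pvStepA line_num st token =
      if token.2.1 == line_num then (pvMinStep st.1 token.2.2.1, pvMaxStep st.2 token.2.2.2)
      else st := by
  simp [pvStepA, pvMinStep, pvMaxStep]

-- A's fold splits into two folds over the filtered list
lemma foldA_eq_filter (line_num : Int) (tokens : List (Int × Int × Int × Int)) :
    ∀ (s e : Option Int),
      tokens.foldl (pvStepA line_num) (s, e) =
        ((tokens.filter (fun t => t.2.1 == line_num)).foldl (fun a t => pvMinStep a t.2.2.1) s,
         (tokens.filter (fun t => t.2.1 == line_num)).foldl (fun a t => pvMaxStep a t.2.2.2) e) := by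
  induction tokens with
  | nil => intro s e; simp
  | cons t ts ih =>
    intro s e
    by_cases h : t.2.1 == line_num
    · simp [h, pvStepA_split, ih]
    · simp [h, pvStepA_split, ih]

lemma foldl_pvMinStep_some (l : List Int) : ∀ v : Int,
    l.foldl pvMinStep (some v) = some (l.foldl min v) := by
  induction l with
  | nil => intro v; simp
  | cons x xs ih =>
    intro v
    have : pvMinStep (some v) x = some (min v x) := by
      simp only [pvMinStep]
      split_ifs with h <;> simp only [Option.some.injEq] <;> omega
    simp [this, ih]

lemma foldl_pvMaxStep_some (l : List Int) : ∀ v : Int,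
    l.foldl pvMaxStep (some v) = some (l.foldl max v) := by
  induction l with
  | nil => intro v; simp
  | cons x xs ih =>
    intro v
    have : pvMaxStep (some v) x = some (max v x) := by
      simp only [pvMaxStep]
      split_ifs with h <;> simp only [Option.some.injEq] <;> omega
    simp [this, ih]

lemma foldl_pvMinStep_none (l : List Int) :
    l.foldl pvMinStep none = l.min? := by
  cases l with
  | nil => simp [List.min?]
  | cons x xs => simp [List.min?, pvMinStep, foldl_pvMinStep_some]

lemma foldl_pvMaxStep_none (l : List Int) :
    l.foldl pvMaxStep none = l.max? := by
  cases l with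
  | nil => simp [List.max?]
  | cons x xs => simp [List.max?, pvMaxStep, foldl_pvMaxStep_some]

-- head of the ascending sort is the minimum
lemma head_sorted_eq_min? (l : List Int) :
    (PySem.List.sorted l (fun x => x) false).head? = l.min? := by
  rcases h : PySem.List.sorted l (fun x => x) false with _ | ⟨m, t⟩
  · have : l = [] := (PySem.List.sorted_eq_nil_iff l (fun x => x) false).1 h
    subst this; simp
  · have hmem : m ∈ l := by
      have := PySem.List.mem_sorted (xs := l) (key := fun x => x) (rev := false) (x := m)
      rw [h] at this; exact this.1 (by simp)
    have hle : ∀ y ∈ l, m ≤ y := PySem.List.key_head_sorted_le l (fun x => x) h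
    have : l.min? = some m := by
      rw [List.min?_eq_some_iff] ; exact ⟨hmem, hle⟩
    simp [this]

-- head of the descending sort is the maximum
lemma head_sorted_rev_eq_max? (l : List Int) :
    (PySem.List.sorted l (fun x => x) true).head? = l.max? := by
  rcases h : PySem.List.sorted l (fun x => x) true with _ | ⟨m, t⟩
  · have : l = [] := (PySem.List.sorted_eq_nil_iff l (fun x => x) true).1 h
    subst this; simp
  · have hmem : m ∈ l := by
      have := PySem.List.mem_sorted (xs := l) (key := fun x => x) (rev := true) (x := m)
      rw [h] at this; exact this.1 (by simp)
    have hge : ∀ y ∈ l, y ≤ m := PySem.List.key_head_sorted_rev_ge l (fun x => x) h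
    have : l.max? = some m := by
      rw [List.max?_eq_some_iff] ; exact ⟨hmem, hge⟩
    simp [this]

-- ===== VERDICT (by name: the statement is the Claim_ definition above) =====
theorem get_token_range_on_line_spec : Claim_equal_get_token_range_on_line := by
  intro tokens line_num _
  unfold Spec_get_token_range_on_line get_token_range_on_line get_token_range_on_line_alt
  rw [foldA_eq_filter]
  set f := tokens.filter (fun t => t.2.1 == line_num) with hf
  have hmin : f.foldl (fun a t => pvMinStep a t.2.2.1) (none : Option Int)
      = (f.map (fun t => t.2.2.1)).min? := by
    rw [← foldl_pvMinStep_none, List.foldl_map]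
  have hmax : f.foldl (fun a t => pvMaxStep a t.2.2.2) (none : Option Int)
      = (f.map (fun t => t.2.2.2)).max? := by
    rw [← foldl_pvMaxStep_none, List.foldl_map]
  rw [hmin, hmax]
  by_cases hnil : PySem.List.sorted (f.map (fun t => t.2.2.1)) (fun x => x) false = []
  · have hfe : f = [] := by
      have := (PySem.List.sorted_eq_nil_iff _ (fun x => x) false).1 hnil
      simpa using this
    simp [hfe, PySem.List.sorted]
  · rw [if_neg hnil, head_sorted_eq_min?, head_sorted_rev_eq_max?]
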